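-- pv_equiv track=rewrite | github.com/jung-jinyoung/algo_study | programmers/월간 코드 챌린지3/공 이동 시뮬레이션.py | solution
-- ===== SOURCE A (Python) =====
-- def solution(n, m, x, y, queries):
--     x1, x2, y1, y2 = x, x, y, y  # 시작점으로 영역 설정
--
--     # 쿼리를 역순으로 처리
--     for command, distance in reversed(queries):
--         if command == 0:  # 열 감소 -> 열 증가
--             y2 += distance
--             if y2 >= m:
--                 y2 = m - 1
--             if y1 != 0:
--                 y1 += distance
--             if y1 >= m:
--                 return 0
--
--         elif command == 1:  # 열 증가 -> 열 감소
--             y1 -= distance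
--             if y1 < 0:
--                 y1 = 0
--             if y2 != m - 1:
--                 y2 -= distance
--             if y2 < 0:
--                 return 0
--
--         elif command == 2:  # 행 감소 -> 행 증가
--             x2 += distance
--             if x2 >= n:
--                 x2 = n - 1
--             if x1 != 0:
--                 x1 += distance
--             if x1 >= n:
--                 return 0
--
--         elif command == 3:  # 행 증가 -> 행 감소
--             x1 -= distance
--             if x1 < 0:
--                 x1 = 0
--             if x2 != n - 1:
--                 x2 -= distance
--             if x2 < 0:
--                 return 0
--
--     return (x2 - x1 + 1) * (y2 - y1 + 1)
-- ===== SOURCE B (Python) =====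
-- def _low(bound, start, moves):
--     # low endpoint of the interval: its recurrence reads only itself;
--     # collapses (None) when a grow step pushes it past the wall
--     v = start
--     for grow, d in moves:
--         if grow:
--             if v != 0:
--                 v += d
--             if v >= bound:
--                 return None
--         else:
--             v = max(v - d, 0)
--     return v
--
--
-- def _high(bound, start, moves):
--     # high endpoint of the interval: also a self-contained recurrence;
--     # collapses (None) when a shrink step pushes it below 0
--     v = start
--     for grow, d in moves:
--         if grow:
--             v = min(v + d, bound - 1)
--         else:
--             if v != bound - 1:
--                 v -= d
--             if v < 0:
--                 return None
--     return v
--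
--
-- def solution(n, m, x, y, queries):
--     rev = queries[::-1]
--     xmoves = [(c == 2, d) for c, d in rev if c == 2 or c == 3]
--     ymoves = [(c == 0, d) for c, d in rev if c == 0 or c == 1]
--     x1 = _low(n, x, xmoves)
--     x2 = _high(n, x, xmoves)
--     y1 = _low(m, y, ymoves)
--     y2 = _high(m, y, ymoves)
--     if x1 is None or x2 is None or y1 is None or y2 is None:
--         return 0
--     return (x2 - x1 + 1) * (y2 - y1 + 1)
-- ===== Notes on version B (the rewrite author's own statement) =====
-- stated objective: alternative
-- what changed: The four interval endpoints x1,x2,y1,y2 never read each other in A's reverse loop, so B replaces the single 4-branch stateful loop with early return by four independent one-variable scans (a low-endpoint and a high-endpoint pass per axis), each returning its final value or None on collapse, combined only at the end.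
import Mathlib
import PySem

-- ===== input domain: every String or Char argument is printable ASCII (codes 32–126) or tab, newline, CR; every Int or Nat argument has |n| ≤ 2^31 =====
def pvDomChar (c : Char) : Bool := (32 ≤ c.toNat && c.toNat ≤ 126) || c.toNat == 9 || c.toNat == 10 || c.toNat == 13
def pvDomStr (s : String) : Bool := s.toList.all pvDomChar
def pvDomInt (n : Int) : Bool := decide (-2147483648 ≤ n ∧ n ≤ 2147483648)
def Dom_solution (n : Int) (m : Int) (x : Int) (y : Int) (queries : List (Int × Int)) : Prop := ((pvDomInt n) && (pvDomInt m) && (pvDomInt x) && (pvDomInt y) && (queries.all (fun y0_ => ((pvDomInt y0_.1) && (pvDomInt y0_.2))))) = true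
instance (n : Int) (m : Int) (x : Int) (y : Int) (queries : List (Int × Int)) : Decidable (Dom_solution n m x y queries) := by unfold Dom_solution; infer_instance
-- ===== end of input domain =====

-- B decouples A's interleaved 4-branch reverse loop into four independent one-variable
-- endpoint scans (low/high per axis), each signalling collapse with none; alternative
-- decomposition, same cost and return value.


-- ===== PORT A =====
-- A's reverse loop: one pass over reversed(queries), 4 branches, early return 0.
def solLoopA (n m : Int) : Int → Int → Int → Int → List (Int × Int) → Int
  | x1, x2, y1, y2, [] => (x2 - x1 + 1) * (y2 - y1 + 1)
  | x1, x2, y1, y2, (command, distance) :: rest =>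
    if command = 0 then
      let y2' := y2 + distance
      let y2' := if y2' ≥ m then m - 1 else y2'
      let y1' := if y1 ≠ 0 then y1 + distance else y1
      if y1' ≥ m then 0 else solLoopA n m x1 x2 y1' y2' rest
    else if command = 1 then
      let y1' := y1 - distance
      let y1' := if y1' < 0 then 0 else y1'
      let y2' := if y2 ≠ m - 1 then y2 - distance else y2
      if y2' < 0 then 0 else solLoopA n m x1 x2 y1' y2' rest
    else if command = 2 then
      let x2' := x2 + distance
      let x2' := if x2' ≥ n then n - 1 else x2'
      let x1' := if x1 ≠ 0 then x1 + distance else x1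
      if x1' ≥ n then 0 else solLoopA n m x1' x2' y1 y2 rest
    else if command = 3 then
      let x1' := x1 - distance
      let x1' := if x1' < 0 then 0 else x1'
      let x2' := if x2 ≠ n - 1 then x2 - distance else x2
      if x2' < 0 then 0 else solLoopA n m x1' x2' y1 y2 rest
    else
      solLoopA n m x1 x2 y1 y2 rest

def solution (n : Int) (m : Int) (x : Int) (y : Int) (queries : List (Int × Int)) : Int :=
  solLoopA n m x x y y queries.reverse

-- ===== PORT B =====
-- `_low` of Source B: the interval's low endpoint, a self-contained scalar scan; none = collapsed
def lowLoop (bound : Int) : Int → List (Bool × Int) → Option Int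
  | v, [] => some v
  | v, (grow, d) :: rest =>
    if grow then
      let v' := if v ≠ 0 then v + d else v
      if v' ≥ bound then none else lowLoop bound v' rest
    else
      lowLoop bound (max (v - d) 0) rest

-- `_high` of Source B: the interval's high endpoint, also self-contained; none = collapsed
def highLoop (bound : Int) : Int → List (Bool × Int) → Option Int
  | v, [] => some v
  | v, (grow, d) :: rest =>
    if grow then
      highLoop bound (min (v + d) (bound - 1)) rest
    else
      let v' := if v ≠ bound - 1 then v - d else v
      if v' < 0 then none else highLoop bound v' rest

def xMoves (queries : List (Int × Int)) : List (Bool × Int) :=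
  queries.filterMap (fun q => if q.1 = 2 ∨ q.1 = 3 then some (decide (q.1 = 2), q.2) else none)

def yMoves (queries : List (Int × Int)) : List (Bool × Int) :=
  queries.filterMap (fun q => if q.1 = 0 ∨ q.1 = 1 then some (decide (q.1 = 0), q.2) else none)

-- the final "if any is None: 0 else product" of Source B
def combine4 : Option Int → Option Int → Option Int → Option Int → Int
  | some x1, some x2, some y1, some y2 => (x2 - x1 + 1) * (y2 - y1 + 1)
  | _, _, _, _ => 0

def solution_alt (n : Int) (m : Int) (x : Int) (y : Int) (queries : List (Int × Int)) : Int :=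
  let rev := queries.reverse
  combine4 (lowLoop n x (xMoves rev)) (highLoop n x (xMoves rev))
           (lowLoop m y (yMoves rev)) (highLoop m y (yMoves rev))

-- ===== PRECONDITION & SPEC =====
def Spec_solution (n : Int) (m : Int) (x : Int) (y : Int) (queries : List (Int × Int)) (out : Int) : Prop := out = solution_alt n m x y queries
instance (n : Int) (m : Int) (x : Int) (y : Int) (queries : List (Int × Int)) (out : Int) : Decidable (Spec_solution n m x y queries out) := by unfold Spec_solution; infer_instance

-- ===== CLAIM (what is proved, stated in full; the proofs are below) =====
def Claim_equal_solution : Prop := ∀ (n : Int) (m : Int) (x : Int) (y : Int) (queries : List (Int × Int)), Dom_solution n m x y queries → Spec_solution n m x y queries (solution n m x y queries)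

-- ===== LEMMAS AND PROOFS =====

theorem combine4_none1 (b c e : Option Int) : combine4 none b c e = 0 := by
  rcases b with _ | b <;> rcases c with _ | c <;> rcases e with _ | e <;> rfl

theorem combine4_none2 (a c e : Option Int) : combine4 a none c e = 0 := by
  rcases a with _ | a <;> rcases c with _ | c <;> rcases e with _ | e <;> rfl

theorem combine4_none3 (a b e : Option Int) : combine4 a b none e = 0 := by
  rcases a with _ | a <;> rcases b with _ | b <;> rcases e with _ | e <;> rfl

theorem combine4_none4 (a b c : Option Int) : combine4 a b c none = 0 := by
  rcases a with _ | a <;> rcases b with _ | b <;> rcases c with _ | c <;> rfl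

theorem min_clamp (v d bound : Int) :
    min (v + d) (bound - 1) = if v + d ≥ bound then bound - 1 else v + d := by
  rw [min_def]; split_ifs <;> omega

theorem max_clamp (v d : Int) :
    max (v - d) 0 = if v - d < 0 then 0 else v - d := by
  rw [max_def]; split_ifs <;> omega

theorem xMoves_cons (c d : Int) (L : List (Int × Int)) :
    xMoves ((c, d) :: L) = if c = 2 ∨ c = 3 then (decide (c = 2), d) :: xMoves L else xMoves L := by
  simp only [xMoves, List.filterMap_cons]; split_ifs <;> simp_all

theorem yMoves_cons (c d : Int) (L : List (Int × Int)) :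
    yMoves ((c, d) :: L) = if c = 0 ∨ c = 1 then (decide (c = 0), d) :: yMoves L else yMoves L := by
  simp only [yMoves, List.filterMap_cons]; split_ifs <;> simp_all

-- A's interleaved loop equals the four independent endpoint scans combined at the end
theorem solLoopA_eq_scans (n m : Int) :
    ∀ (L : List (Int × Int)) (x1 x2 y1 y2 : Int),
      solLoopA n m x1 x2 y1 y2 L =
        combine4 (lowLoop n x1 (xMoves L)) (highLoop n x2 (xMoves L))
                 (lowLoop m y1 (yMoves L)) (highLoop m y2 (yMoves L)) := by
  intro L
  induction L with
  | nil => intro x1 x2 y1 y2; simp [solLoopA, lowLoop, highLoop, xMoves, yMoves, combine4]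
  | cons q rest ih =>
    intro x1 x2 y1 y2
    obtain ⟨command, distance⟩ := q
    rw [xMoves_cons, yMoves_cons]
    by_cases h0 : command = 0
    · subst h0
      rw [if_neg (by decide), if_pos (by decide)]
      simp only [solLoopA, lowLoop, highLoop, min_clamp, decide_eq_true_eq]
      split_ifs <;> simp_all [combine4_none3]
    · by_cases h1 : command = 1
      · subst h1
        rw [if_neg (by decide), if_pos (by decide)]
        simp only [solLoopA, lowLoop, highLoop, max_clamp,
          if_neg (by decide : ¬(1:Int) = 0), decide_eq_true_eq]
        split_ifs <;> simp_all [combine4_none4]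
      · by_cases h2 : command = 2
        · subst h2
          rw [if_pos (by decide), if_neg (by decide)]
          simp only [solLoopA, lowLoop, highLoop, min_clamp,
            if_neg (by decide : ¬(2:Int) = 0), if_neg (by decide : ¬(2:Int) = 1),
            decide_eq_true_eq]
          split_ifs <;> simp_all [combine4_none1]
        · by_cases h3 : command = 3
          · subst h3
            rw [if_pos (by decide), if_neg (by decide)]
            simp only [solLoopA, lowLoop, highLoop, max_clamp,
              if_neg (by decide : ¬(3:Int) = 0), if_neg (by decide : ¬(3:Int) = 1),
              if_neg (by decide : ¬(3:Int) = 2), decide_eq_true_eq]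
            split_ifs <;> simp_all [combine4_none2]
          · rw [if_neg (by tauto), if_neg (by tauto)]
            simp only [solLoopA, if_neg h0, if_neg h1, if_neg h2, if_neg h3]
            exact ih x1 x2 y1 y2

-- ===== VERDICT (by name: the statement is the Claim_ definition above) =====
theorem solution_spec : Claim_equal_solution := by
  intro n m x y queries _
  unfold Spec_solution solution solution_alt
  exact solLoopA_eq_scans n m queries.reverse x x y y
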